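-- pv_equiv track=rewrite | github.com/Danielh112/CM1101 | game3/game.py | list_of_objects
-- ===== SOURCE A (Python) =====
-- def list_of_objects(objects):
--     """This function takes a dictionary of objects and returns a ascendingly sorted
--     comma-separated sentence of object names (as a string).
--
--     >>> list_of_objects({"red flare": item_red_flare, "dress": item_dress})
--     'a little cocktail dress and a red flare'
--
--     >>> list_of_objects({"shoes": item_shoes})
--     'a pair of old shoes'
--
--     >>> list_of_objects({"keys": item_keys, "batteries": item_batteries, "pistol": item_pistol})
--     'a pistol, a set of keys and some batteries'
--
--     >>> list_of_objects({})
--     ''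
--     """
--     # Create a list of item_names.
--     object_name = [obj["name"] for obj in objects.values()]
--     object_name = sorted(object_name)
--     # Create an indexable dictionary for the final sentence.
--     sentence = {}
--     for x in range(0, len(object_name)):
--         # Assign every other word in dictionary an item name.
--         sentence[x * 2] = object_name[x]
--         # Fill in empty entries with joining strings.
--         if x != len(object_name) - 1:
--             sentence[x * 2 + 1] = ", "
--         elif len(object_name) > 1:
--             sentence[x * 2 - 1] = " and "
--     return "".join(sentence.values())
-- ===== SOURCE B (Python) =====
-- def list_of_objects(objects):
--     names = sorted(obj["name"] for obj in objects.values())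
--     if not names:
--         return ""
--     if len(names) == 1:
--         return names[0]
--     return ", ".join(names[:-1]) + " and " + names[-1]
-- ===== Notes on version B (the rewrite author's own statement) =====
-- stated objective: simpler
-- what changed: Replaces A's index-arithmetic dict of alternating name/separator slots (with the last ', ' overwritten in place by ' and ') by direct slicing: ', '.join on all names but the last plus ' and ' plus the last, with two guards for the empty and singleton cases.
import Mathlib
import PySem

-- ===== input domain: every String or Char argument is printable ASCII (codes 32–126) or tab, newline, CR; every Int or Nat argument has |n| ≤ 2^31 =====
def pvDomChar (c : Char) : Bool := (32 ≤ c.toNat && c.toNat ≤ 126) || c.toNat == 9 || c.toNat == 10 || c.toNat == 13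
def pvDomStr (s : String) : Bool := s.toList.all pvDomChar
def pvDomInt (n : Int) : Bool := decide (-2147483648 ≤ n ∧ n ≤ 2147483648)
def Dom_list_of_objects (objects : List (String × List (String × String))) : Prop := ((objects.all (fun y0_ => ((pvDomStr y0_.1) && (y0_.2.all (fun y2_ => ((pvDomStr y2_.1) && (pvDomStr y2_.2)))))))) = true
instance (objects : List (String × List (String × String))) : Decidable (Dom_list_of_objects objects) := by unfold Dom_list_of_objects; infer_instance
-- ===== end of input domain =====

-- B replaces A's index-arithmetic separator dict by list slicing and join; objective: simpler.
-- ===== PORT A =====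
def list_of_objects (objects : List (String × List (String × String))) : String :=
  let object_name : List String :=
    (PySem.Dict.ofList objects).values.map (fun obj => (PySem.Dict.ofList obj).getD "name" "")
  let object_name := PySem.List.sorted object_name (fun x => x) false
  let sentence : PySem.Dict Int String :=
    (PySem.List.pyRange 0 (object_name.length : Int) 1).foldl (fun s x =>
      let s := s.insert (x * 2) (PySem.List.pyGetD object_name x "")
      if x ≠ (object_name.length : Int) - 1 then s.insert (x * 2 + 1) ", "
      else if 1 < (object_name.length : Int) then s.insert (x * 2 - 1) " and "
      else s) PySem.Dict.empty
  PySem.Str.join "" sentence.values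

-- ===== PORT B =====
-- Source B's '+' concatenation is ported as "".join of the three pieces (exact).
def list_of_objects_alt (objects : List (String × List (String × String))) : String :=
  let names : List String :=
    PySem.List.sorted ((PySem.Dict.ofList objects).values.map
      (fun obj => (PySem.Dict.ofList obj).getD "name" "")) (fun x => x) false
  match names with
  | [] => ""
  | [n] => n
  | _ => PySem.Str.join ""
      [PySem.Str.join ", " (PySem.List.slice names none (some (-1))), " and ",
       PySem.List.pyGetD names (-1) ""]

-- ===== PRECONDITION & SPEC =====
-- Pre_ excludes exactly the inputs where some stored object lacks a "name" key: there Python A raises KeyError.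
def Pre_list_of_objects (objects : List (String × List (String × String))) : Prop :=
  ∀ v ∈ (PySem.Dict.ofList objects).values, (PySem.Dict.ofList v).contains "name" = true
instance (objects : List (String × List (String × String))) : Decidable (Pre_list_of_objects objects) := by unfold Pre_list_of_objects; infer_instance
def pvWitness_list_of_objects : (List (String × List (String × String))) :=
  [("shoes", [("name", "a pair of old shoes")]), ("keys", [("name", "a set of keys")])]
def Spec_list_of_objects (objects : List (String × List (String × String))) (out : String) : Prop := out = list_of_objects_alt objects
instance (objects : List (String × List (String × String))) (out : String) : Decidable (Spec_list_of_objects objects out) := by unfold Spec_list_of_objects; infer_instance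

-- ===== CLAIM (what is proved, stated in full; the proofs are below) =====
def Claim_equal_list_of_objects : Prop := ∀ (objects : List (String × List (String × String))), Dom_list_of_objects objects → Pre_list_of_objects objects → Spec_list_of_objects objects (list_of_objects objects)

-- ===== LEMMAS AND PROOFS =====
-- A's separator dict after the first m (non-final) iterations: alternating name/", " slots.
def pvBlock (ns : List String) : Nat → List (Int × String)
  | 0 => []
  | m + 1 => pvBlock ns m ++ [((m : Int) * 2, PySem.List.pyGetD ns (m : Int) ""), ((m : Int) * 2 + 1, ", ")]

theorem pvBlock_key_lt (ns : List String) (m : Nat) :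
    ∀ p ∈ pvBlock ns m, p.1 < (m : Int) * 2 := by
  induction m with
  | zero => simp [pvBlock]
  | succ m ih =>
    intro p hp
    simp only [pvBlock, List.mem_append, List.mem_cons] at hp
    rcases hp with h | h | h | h
    · have := ih p h; push_cast; omega
    · subst h; push_cast; omega
    · subst h; push_cast; omega
    · simp at h

theorem pv_insert_fresh {l : List (Int × String)} {k : Int} {v : String}
    (h : k ∉ l.map Prod.fst) :
    (PySem.Dict.mk l).insert k v = PySem.Dict.mk (l ++ [(k, v)]) := by
  have hc : (PySem.Dict.mk l).contains k = false := by
    rw [PySem.Dict.contains_eq_decide_mem_keys]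
    simp only [PySem.Dict.keys_mk, decide_eq_false_iff_not]
    exact h
  apply PySem.Dict.ext
  rw [PySem.Dict.items_insert_of_not_contains _ _ hc]

theorem pvLoop_eq (ns : List String) (L : Int) (m : Nat) (h : (m : Int) + 1 ≤ L) :
    (PySem.List.pyRange 0 (m : Int) 1).foldl (fun s x =>
      let s := s.insert (x * 2) (PySem.List.pyGetD ns x "")
      if x ≠ L - 1 then s.insert (x * 2 + 1) ", "
      else if 1 < L then s.insert (x * 2 - 1) " and "
      else s) PySem.Dict.empty = PySem.Dict.mk (pvBlock ns m) := by
  induction m with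
  | zero =>
    rw [show ((0 : Nat) : Int) = 0 by norm_num, PySem.List.pyRange_one_eq_nil (by omega)]
    rfl
  | succ m ih =>
    have hm1 : (m : Int) + 1 ≤ L := by push_cast at h; omega
    rw [show ((m + 1 : Nat) : Int) = (m : Int) + 1 by push_cast; ring,
        PySem.List.pyRange_one_succ_right (by positivity), List.foldl_append, ih hm1]
    simp only [List.foldl]
    have hne : ((m : Int) ≠ L - 1) := by push_cast at h; omega
    rw [if_pos hne]
    have h1 : (PySem.Dict.mk (pvBlock ns m)).insert ((m : Int) * 2) (PySem.List.pyGetD ns (m : Int) "")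
        = PySem.Dict.mk (pvBlock ns m ++ [((m : Int) * 2, PySem.List.pyGetD ns (m : Int) "")]) := by
      apply pv_insert_fresh
      intro hmem
      simp only [List.mem_map] at hmem
      obtain ⟨p, hp, hpk⟩ := hmem
      have hlt := pvBlock_key_lt ns m p hp
      omega
    have h2 : (PySem.Dict.mk (pvBlock ns m ++ [((m : Int) * 2, PySem.List.pyGetD ns (m : Int) "")])).insert ((m : Int) * 2 + 1) ", "
        = PySem.Dict.mk ((pvBlock ns m ++ [((m : Int) * 2, PySem.List.pyGetD ns (m : Int) "")]) ++ [((m : Int) * 2 + 1, ", ")]) := by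
      apply pv_insert_fresh
      intro hmem
      simp only [List.map_append, List.mem_append, List.mem_map] at hmem
      rcases hmem with ⟨p, hp, hpk⟩ | ⟨p, hp, hpk⟩
      · have hlt := pvBlock_key_lt ns m p hp; omega
      · rw [List.mem_singleton] at hp; subst hp; simp at hpk
    rw [h1, h2]
    simp [pvBlock]

theorem pv_join_nil_flatten (l : List (List Char)) : PySem.Chars.join [] l = l.flatten := by
  induction l with
  | nil => simp [PySem.Chars.join_nil]
  | cons p rest ih =>
    cases rest with
    | nil => simp [PySem.Chars.join_singleton]
    | cons q rs => rw [PySem.Chars.join_cons_cons] at *; simp [ih]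

theorem pv_join_append_singleton (sep : List Char) (ts : List (List Char)) (x : List Char) :
    PySem.Chars.join sep (ts ++ [x]) = ts.flatMap (fun n => n ++ sep) ++ x := by
  induction ts with
  | nil => simp [PySem.Chars.join_singleton]
  | cons t rest ih =>
    cases rest with
    | nil => simp [PySem.Chars.join_cons_cons, PySem.Chars.join_singleton]
    | cons q rs =>
      simp only [List.cons_append, PySem.Chars.join_cons_cons]
      simp only [List.cons_append] at ih
      simp [ih]

theorem pv_flat (ts : List String) (c : List Char) :
    (ts.flatMap (fun a => [a.toList, c])).flatten = (ts.map String.toList).flatMap (fun n => n ++ c) := by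
  induction ts with
  | nil => simp
  | cons t rest ih => simp [ih]

-- the sentence identity: names joined with ", ", last ", " turned into " and "
theorem pv_sentence (ts : List String) (x y : String) :
    PySem.Str.join "" (ts.flatMap (fun n => [n, ", "]) ++ [x, " and ", y]) =
    PySem.Str.join "" [PySem.Str.join ", " (ts ++ [x]), " and ", y] := by
  rw [← String.toList_inj]
  rw [PySem.Str.toList_join, PySem.Str.toList_join]
  simp only [List.map_append, List.map_flatMap, List.map_cons, List.map_nil]
  rw [show ("".toList) = ([] : List Char) from rfl]
  rw [pv_join_nil_flatten, pv_join_nil_flatten]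
  rw [PySem.Str.toList_join]
  simp only [List.map_append, List.map_cons, List.map_nil]
  rw [pv_join_append_singleton]
  simp [pv_flat]

theorem pvBlock_snd (ns : List String) (m : Nat) (h : m ≤ ns.length) :
    (pvBlock ns m).map Prod.snd = (ns.take m).flatMap (fun n => [n, ", "]) := by
  induction m with
  | zero => simp [pvBlock]
  | succ m ih =>
    have hm : m < ns.length := by omega
    simp only [pvBlock, List.map_append, ih (by omega), List.map_cons, List.map_nil]
    rw [PySem.List.pyGetD_natCast]
    have ht : List.take (m + 1) ns = List.take m ns ++ [ns.getD m ""] := by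
      rw [List.take_add_one, List.getElem?_eq_getElem hm]
      simp [List.getD, List.getElem?_eq_getElem hm]
    rw [ht, List.flatMap_append]
    simp

theorem pvA_eq_B (ns : List String) :
    PySem.Str.join "" ((PySem.List.pyRange 0 (ns.length : Int) 1).foldl (fun s x =>
      let s := s.insert (x * 2) (PySem.List.pyGetD ns x "")
      if x ≠ (ns.length : Int) - 1 then s.insert (x * 2 + 1) ", "
      else if 1 < (ns.length : Int) then s.insert (x * 2 - 1) " and "
      else s) PySem.Dict.empty).values =
    (match ns with
     | [] => ""
     | [n] => n
     | _ => PySem.Str.join ""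
        [PySem.Str.join ", " (PySem.List.slice ns none (some (-1))), " and ",
         PySem.List.pyGetD ns (-1) ""]) := by
  match ns with
  | [] => rfl
  | [a] =>
    have hr : PySem.List.pyRange 0 ((([a] : List String)).length : Int) 1 = [(0 : Int)] := by
      have : ((([a] : List String)).length : Int) = 0 + 1 := by simp
      rw [this, PySem.List.pyRange_one_singleton]
    rw [hr]
    simp only [List.foldl, List.length_cons, List.length_nil]
    norm_num
    rw [show (PySem.Dict.empty : PySem.Dict Int String) = PySem.Dict.mk [] from rfl,
        pv_insert_fresh (by simp)]
    show PySem.Str.join "" [a] = a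
    rw [← String.toList_inj, PySem.Str.toList_join]
    simp [PySem.Chars.join_singleton]
  | a :: b :: t =>
    have hlen : ((a :: b :: t : List String)).length = t.length + 2 := by simp
    have hsplit : PySem.List.pyRange 0 (((a :: b :: t : List String)).length : Int) 1
        = PySem.List.pyRange 0 ((t.length + 1 : Nat) : Int) 1 ++ [((t.length + 1 : Nat) : Int)] := by
      rw [show ((((a :: b :: t : List String))).length : Int) = ((t.length + 1 : Nat) : Int) + 1 by
            rw [hlen]; push_cast; ring]
      exact PySem.List.pyRange_one_succ_right (by positivity)
    rw [hsplit, List.foldl_append,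
        pvLoop_eq (a :: b :: t) _ (t.length + 1) (by rw [hlen]; push_cast; omega)]
    simp only [List.foldl]
    rw [if_neg (by rw [hlen]; push_cast; omega)]
    rw [if_pos (by rw [hlen]; push_cast; omega)]
    rw [pv_insert_fresh (l := pvBlock (a :: b :: t) (t.length + 1))
      (k := ((t.length + 1 : Nat) : Int) * 2)
      (v := PySem.List.pyGetD (a :: b :: t) ((t.length + 1 : Nat) : Int) "") (by
      intro hmem
      simp only [List.mem_map] at hmem
      obtain ⟨p, hp, hpk⟩ := hmem
      have hlt := pvBlock_key_lt (a :: b :: t) (t.length + 1) p hp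
      push_cast at hlt hpk
      omega)]
    have hcont : (PySem.Dict.mk (pvBlock (a :: b :: t) (t.length + 1)
          ++ [(((t.length + 1 : Nat) : Int) * 2,
               PySem.List.pyGetD (a :: b :: t) ((t.length + 1 : Nat) : Int) "")])).contains
        (((t.length + 1 : Nat) : Int) * 2 - 1) = true := by
      rw [PySem.Dict.contains_mk]
      apply List.any_eq_true.mpr
      refine ⟨((t.length : Int) * 2 + 1, ", "), List.mem_append_left _ (by simp [pvBlock]), ?_⟩
      simp only [beq_iff_eq]
      push_cast
      ring
    have h2 : (PySem.Dict.mk (pvBlock (a :: b :: t) (t.length + 1)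
          ++ [(((t.length + 1 : Nat) : Int) * 2,
               PySem.List.pyGetD (a :: b :: t) ((t.length + 1 : Nat) : Int) "")])).insert
          (((t.length + 1 : Nat) : Int) * 2 - 1) " and "
        = PySem.Dict.mk (pvBlock (a :: b :: t) t.length
            ++ [((t.length : Int) * 2, PySem.List.pyGetD (a :: b :: t) (t.length : Int) ""),
                ((t.length : Int) * 2 + 1, " and "),
                (((t.length + 1 : Nat) : Int) * 2,
                 PySem.List.pyGetD (a :: b :: t) ((t.length + 1 : Nat) : Int) "")]) := by
      apply PySem.Dict.ext
      rw [PySem.Dict.items_insert_of_contains _ _ hcont]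
      simp only [pvBlock, List.map_append, List.map_cons, List.map_nil]
      have hid : List.map
          (fun p => if (p.1 == ((t.length + 1 : Nat) : Int) * 2 - 1) = true
                    then (((t.length + 1 : Nat) : Int) * 2 - 1, " and ") else p)
          (pvBlock (a :: b :: t) t.length) = pvBlock (a :: b :: t) t.length := by
        conv_rhs => rw [← List.map_id (pvBlock (a :: b :: t) t.length)]
        apply List.map_congr_left
        intro p hp
        have hlt := pvBlock_key_lt (a :: b :: t) t.length p hp
        have hne : ¬((p.1 == ((t.length + 1 : Nat) : Int) * 2 - 1) = true) := by
          simp only [beq_iff_eq]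
          push_cast
          omega
        rw [if_neg hne]
        rfl
      rw [hid]
      rw [if_neg (by simp only [beq_iff_eq]; push_cast; omega)]
      rw [if_pos (by simp only [beq_iff_eq]; push_cast; ring)]
      rw [if_neg (by simp only [beq_iff_eq]; push_cast; omega)]
      simp
      ring
    rw [h2]
    rw [show (PySem.Dict.mk (pvBlock (a :: b :: t) t.length
            ++ [((t.length : Int) * 2, PySem.List.pyGetD (a :: b :: t) (t.length : Int) ""),
                ((t.length : Int) * 2 + 1, " and "),
                (((t.length + 1 : Nat) : Int) * 2,
                 PySem.List.pyGetD (a :: b :: t) ((t.length + 1 : Nat) : Int) "")])).values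
        = (pvBlock (a :: b :: t) t.length).map Prod.snd
            ++ [PySem.List.pyGetD (a :: b :: t) (t.length : Int) "", " and ",
                PySem.List.pyGetD (a :: b :: t) ((t.length + 1 : Nat) : Int) ""] by
      rw [PySem.Dict.values_mk]
      simp]
    rw [pvBlock_snd (a :: b :: t) t.length (by rw [hlen]; omega), PySem.List.pyGetD_natCast,
        PySem.List.pyGetD_natCast, pv_sentence]
    rw [PySem.List.slice_to_neg_one]
    have hget : PySem.List.pyGetD (a :: b :: t) (-1) "" = (a :: b :: t).getD (t.length + 1) "" := by
      simp [PySem.List.pyGetD, PySem.List.pyGet?, PySem.List.pyIdx?]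
    have hdrop : (a :: b :: t).dropLast
        = (a :: b :: t).take t.length ++ [(a :: b :: t).getD t.length ""] := by
      rw [List.dropLast_eq_take]
      have h : (a :: b :: t).length - 1 = t.length + 1 := by simp
      rw [h, List.take_add_one, List.getElem?_eq_getElem (by simp)]
      simp [List.getD]
    rw [hget, hdrop]
-- ===== VERDICT (by name: the statement is the Claim_ definition above) =====
theorem list_of_objects_spec : Claim_equal_list_of_objects := by
  intro objects _ _
  unfold Spec_list_of_objects list_of_objects list_of_objects_alt
  exact pvA_eq_B _
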